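-- pv_equiv track=rewrite | github.com/hotgluexyz/tap-stripe-v2 | tap_stripe/client.py | mark_last_item
-- ===== SOURCE A (Python) =====
-- def mark_last_item(generator):
--     iterator = iter(generator)
--     try:
--         # Attempt to get the first item
--         previous = next(iterator)
--     except StopIteration:
--         # If generator is empty, exit the function
--         return
--
--     # Iterate through remaining items
--     for current in iterator:
--         yield previous, False
--         previous = current
--
--     # Yield the last item with `is_last=True`
--     yield previous, True
-- ===== SOURCE B (Python) =====
-- def mark_last_item(generator):
--     # Materialize-then-enumerate: collect all items up front, then mark by index
--     # comparison against the length (no lookahead, no try/except).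
--     items = list(generator)
--     n = len(items)
--     for i, item in enumerate(items):
--         yield item, i == n - 1
-- ===== Notes on version B (the rewrite author's own statement) =====
-- stated objective: simpler
-- what changed: Instead of a single-pass lookahead carrying the previous item, B materializes the input into a list and then yields each item with is_last computed as an index-vs-length comparison (i == n-1) over enumerate.
import Mathlib
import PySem

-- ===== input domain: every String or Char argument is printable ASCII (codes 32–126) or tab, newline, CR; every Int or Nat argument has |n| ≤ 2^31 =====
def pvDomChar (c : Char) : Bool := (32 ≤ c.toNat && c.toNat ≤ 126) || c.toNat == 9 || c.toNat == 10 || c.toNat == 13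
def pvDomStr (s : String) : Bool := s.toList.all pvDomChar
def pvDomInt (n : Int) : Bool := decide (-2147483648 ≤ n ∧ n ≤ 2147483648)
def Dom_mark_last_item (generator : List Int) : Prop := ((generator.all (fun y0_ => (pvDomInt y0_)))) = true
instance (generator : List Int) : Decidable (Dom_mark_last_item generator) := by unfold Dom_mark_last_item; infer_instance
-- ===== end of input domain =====

-- B marks the last item by materializing the list and comparing index against length, instead of A's one-item lookahead; same O(n) cost, plainer.


-- ===== PORT A =====
-- for-loop over the remaining items carrying `previous`; final yield with True after the loop
def markA_loop (previous : Int) (rest : List Int) : List (Int × Bool) :=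
  match rest with
  | [] => [(previous, true)]
  | current :: t => (previous, false) :: markA_loop current t

def mark_last_item (generator : List Int) : List (Int × Bool) :=
  match generator with
  | [] => []                      -- StopIteration on first next(): return
  | previous :: rest => markA_loop previous rest

-- ===== PORT B =====
-- materialize, take the length, then pair each item with (i == n - 1) over enumerate
def mark_last_item_alt (generator : List Int) : List (Int × Bool) :=
  let items := generator
  let n : Int := items.length
  (PySem.List.enumerate items 0).map (fun p => (p.2, decide (p.1 = n - 1)))

-- ===== PRECONDITION & SPEC =====
def Spec_mark_last_item (generator : List Int) (out : List (Int × Bool)) : Prop := out = mark_last_item_alt generator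
instance (generator : List Int) (out : List (Int × Bool)) : Decidable (Spec_mark_last_item generator out) := by unfold Spec_mark_last_item; infer_instance

-- ===== CLAIM (what is proved, stated in full; the proofs are below) =====
def Claim_equal_mark_last_item : Prop := ∀ (generator : List Int), Dom_mark_last_item generator → Spec_mark_last_item generator (mark_last_item generator)

-- ===== LEMMAS AND PROOFS =====
theorem markA_eq_enum (rest : List Int) : ∀ (p : Int) (s : Int),
    markA_loop p rest
      = (PySem.List.enumerate (p :: rest) s).map
          (fun q => (q.2, decide (q.1 = s + rest.length))) := by
  induction rest with
  | nil =>
    intro p s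
    simp [markA_loop, PySem.List.enumerate_cons, PySem.List.enumerate_nil]
  | cons h t ih =>
    intro p s
    have e : s + (((h :: t).length : Nat) : Int) = (s + 1) + ((t.length : Nat) : Int) := by
      simp only [List.length_cons]; push_cast; ring
    rw [PySem.List.enumerate_cons, List.map_cons, e]
    simp only [markA_loop]
    rw [← ih h (s + 1)]
    have h1 : ¬ (s = (s + 1) + ((t.length : Nat) : Int)) := by omega
    simp [h1]

-- ===== VERDICT (by name: the statement is the Claim_ definition above) =====
theorem mark_last_item_spec : Claim_equal_mark_last_item := by
  intro g _
  unfold Spec_mark_last_item mark_last_item mark_last_item_alt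
  cases g with
  | nil => simp [PySem.List.enumerate_nil]
  | cons p rest =>
    show markA_loop p rest
      = (PySem.List.enumerate (p :: rest) 0).map
          (fun q => (q.2, decide (q.1 = (((p :: rest).length : Nat) : Int) - 1)))
    have e : (((p :: rest).length : Nat) : Int) - 1 = (0 : Int) + ((rest.length : Nat) : Int) := by
      simp only [List.length_cons]; push_cast; ring
    rw [e, markA_eq_enum rest p 0]
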